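-- pv_equiv track=rewrite | github.com/jdickerson95/aoc | 2025/2/advent_2.py | get_factors_dict
-- ===== SOURCE A (Python) =====
-- def get_factors_dict(all_ids):
--     # Get all unique lengths of numbers in the list
--     lengths = set()
--     for num in all_ids:
--         lengths.add(len(str(num)))
--
--     # Create dictionary with length as key and factors as values
--     factors_dict = {}
--     for length in lengths:
--         factors = []
--         for i in range(1, length):
--             if length % i == 0:
--                 factors.append(i)
--
--         factors_dict[length] = factors
--
--
--     return factors_dict
-- ===== SOURCE B (Python) =====
-- def get_factors_dict(all_ids):
--     # same task, different inner algorithm: divisor-pair scan up to sqrt(L) + sort,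
--     # instead of the full 1..L-1 scan
--     lengths = {len(str(n)) for n in all_ids}
--     result = {}
--     for L in lengths:
--         divs = set()
--         i = 1
--         while i * i <= L:
--             if L % i == 0:
--                 divs.add(i)
--                 divs.add(L // i)
--             i += 1
--         divs.discard(L)
--         result[L] = sorted(divs)
--     return result
-- ===== Notes on version B (the rewrite author's own statement) =====
-- stated objective: alternative
-- what changed: The inner full scan over 1..L-1 collecting divisors is replaced by a divisor-pair scan up to sqrt(L) into a set (adding i and L//i, discarding L) followed by an ascending sort; the unique-length set is built by a comprehension.
import Mathlib
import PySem

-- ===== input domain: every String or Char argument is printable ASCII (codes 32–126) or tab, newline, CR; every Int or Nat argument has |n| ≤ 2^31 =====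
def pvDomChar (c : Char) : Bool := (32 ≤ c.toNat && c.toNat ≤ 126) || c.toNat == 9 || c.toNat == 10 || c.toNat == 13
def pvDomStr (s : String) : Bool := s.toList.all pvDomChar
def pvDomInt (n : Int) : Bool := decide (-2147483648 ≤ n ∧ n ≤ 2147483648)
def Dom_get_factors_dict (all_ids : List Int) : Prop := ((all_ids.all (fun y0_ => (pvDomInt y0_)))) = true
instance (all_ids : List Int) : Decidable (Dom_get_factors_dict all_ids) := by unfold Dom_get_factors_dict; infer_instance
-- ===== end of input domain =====

-- B replaces the full 1..L-1 divisor scan with a sqrt-pair scan into a set plus a sort (alternative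
-- structure, not claimed faster: digit-lengths are tiny). Equality is about the returned mapping;
-- both sides produce the keys in first-insertion order of the lengths (dicts are compared ignoring order).

-- ===== PORT A =====
def get_factors_dict (all_ids : List Int) : List (Int × List Int) :=
  let lengths : PySem.Set Int :=
    all_ids.foldl (fun s num => PySem.Set.add s (PySem.Str.len (PySem.Int.toStr num))) PySem.Set.empty
  let factors_dict : PySem.Dict Int (List Int) :=
    lengths.foldl (fun d length =>
      let factors : List Int :=
        (PySem.List.pyRange 1 length 1).foldl
          (fun fs i => if PySem.Int.mod length i == 0 then fs ++ [i] else fs) []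
      d.insert length factors) PySem.Dict.empty
  factors_dict.items

-- ===== PORT B =====
-- the 'while i*i <= L' loop of Source B; fuel only makes it total (never exhausted when fuel > L)
def altDivLoop (L : Int) : Nat → Int → PySem.Set Int → PySem.Set Int
  | 0, _, divs => divs
  | fuel+1, i, divs =>
    if i * i ≤ L then
      altDivLoop L fuel (i+1)
        (if PySem.Int.mod L i == 0
         then PySem.Set.add (PySem.Set.add divs i) (PySem.Int.floordiv L i)
         else divs)
    else divs

def get_factors_dict_alt (all_ids : List Int) : List (Int × List Int) :=
  let lengths : PySem.Set Int :=
    PySem.Set.ofList (all_ids.map (fun n => PySem.Str.len (PySem.Int.toStr n)))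
  let result : PySem.Dict Int (List Int) :=
    lengths.foldl (fun d L =>
      let divs : PySem.Set Int := PySem.Set.discard (altDivLoop L (L.toNat + 1) 1 PySem.Set.empty) L
      d.insert L (PySem.List.sorted divs (fun x => x) false)) PySem.Dict.empty
  result.items

-- ===== PRECONDITION & SPEC =====
def Spec_get_factors_dict (all_ids : List Int) (out : List (Int × List Int)) : Prop := out = get_factors_dict_alt all_ids
instance (all_ids : List Int) (out : List (Int × List Int)) : Decidable (Spec_get_factors_dict all_ids out) := by unfold Spec_get_factors_dict; infer_instance

-- ===== CLAIM (what is proved, stated in full; the proofs are below) =====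
def Claim_equal_get_factors_dict : Prop := ∀ (all_ids : List Int), Dom_get_factors_dict all_ids → Spec_get_factors_dict all_ids (get_factors_dict all_ids)

-- ===== LEMMAS AND PROOFS =====

-- digit-length of an int with |n| ≤ 2^31 is between 0 and 11
lemma pv_len_bound (n : Int) (h : pvDomInt n = true) :
    0 ≤ PySem.Str.len (PySem.Int.toStr n) ∧ PySem.Str.len (PySem.Int.toStr n) ≤ 11 := by
  have hb : -2147483648 ≤ n ∧ n ≤ 2147483648 := by
    simpa [pvDomInt] using h
  have hlen : (PySem.Int.toStr n).toList = PySem.Int.toChars n := PySem.Int.toList_toStr n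
  rw [PySem.Str.len_eq, hlen]
  unfold PySem.Int.toChars
  split_ifs with hneg
  · have habs : n.natAbs < 10 ^ 10 := by omega
    have h10 : (Nat.toDigits 10 n.natAbs).length ≤ 10 :=
      Nat.toDigits_length 10 n.natAbs 10 (by norm_num) habs
    simp only [List.length_cons]
    omega
  · have habs : n.toNat < 10 ^ 10 := by omega
    have h10 : (Nat.toDigits 10 n.toNat).length ≤ 10 :=
      Nat.toDigits_length 10 n.toNat 10 (by norm_num) habs
    omega

-- pointwise: for 0 ≤ L ≤ 11 the two inner computations agree
lemma pv_inner_eq (L : Int) (h0 : 0 ≤ L) (h1 : L ≤ 11) :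
    (PySem.List.pyRange 1 L 1).foldl
        (fun fs i => if PySem.Int.mod L i == 0 then fs ++ [i] else fs) ([] : List Int)
      = PySem.List.sorted (PySem.Set.discard (altDivLoop L (L.toNat + 1) 1 PySem.Set.empty) L)
          (fun x => x) false := by
  interval_cases L <;> decide

-- ===== VERDICT (by name: the statement is the Claim_ definition above) =====
theorem get_factors_dict_spec : Claim_equal_get_factors_dict := by
  intro all_ids hDom
  unfold Spec_get_factors_dict get_factors_dict get_factors_dict_alt
  -- the two unique-length sets coincide
  have hlengths :
      all_ids.foldl (fun s num => PySem.Set.add s (PySem.Str.len (PySem.Int.toStr num))) PySem.Set.empty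
        = PySem.Set.ofList (all_ids.map (fun n => PySem.Str.len (PySem.Int.toStr n))) := by
    rw [← PySem.Set.update_map_eq_foldl_add, PySem.Set.update_empty]
  simp only [hlengths]
  congr 1
  -- the two dict-building folds agree on every length actually occurring
  apply PySem.List.foldl_congr_mem'
  intro L hL d
  have hmem : L ∈ all_ids.map (fun n => PySem.Str.len (PySem.Int.toStr n)) :=
    (PySem.Set.mem_ofList _ _).mp hL
  obtain ⟨n, hn, rfl⟩ := List.mem_map.mp hmem
  have hdn : pvDomInt n = true := by
    have := (List.all_eq_true.mp hDom) n hn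
    simpa using this
  obtain ⟨hge, hle⟩ := pv_len_bound n hdn
  rw [pv_inner_eq _ hge hle]
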